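-- pv_equiv track=rewrite | github.com/mkoistinen/mailjet | mailjet/__main__.py | count_messages
-- ===== SOURCE A (Python) =====
-- from typing import Iterable, List, Optional, Set, Tuple
--
-- SMS_SIZES = [
--     (160, 70), (306, 134), (459, 201), (612, 268), (765, 335)
-- ]
--
-- def count_messages(num_characters, mode='gsm7') -> Optional[int]:
--     """Calculate the number of concatenated messages would be required."""
--     for idx, (gsm7, utf16) in enumerate(SMS_SIZES):
--         if mode == 'gsm7':
--             if gsm7 >= num_characters:
--                 return idx + 1
--         else:
--             if utf16 >= num_characters:
--                 return idx + 1
--     return None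
-- ===== SOURCE B (Python) =====
-- def count_messages(num_characters, mode='gsm7'):
--     """Calculate the number of concatenated messages would be required."""
--     single, extra = (160, 153) if mode == 'gsm7' else (70, 67)
--     if num_characters <= single:
--         return 1
--     n = -(-num_characters // extra)  # ceiling division
--     return n if n <= 5 else None
-- ===== Notes on version B (the rewrite author's own statement) =====
-- stated objective: idiomatic
-- what changed: Replaced the enumerate-scan over the SMS_SIZES table with closed-form ceiling-division arithmetic on per-mode constants (single=160/70, extra=153/67).
import Mathlib
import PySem

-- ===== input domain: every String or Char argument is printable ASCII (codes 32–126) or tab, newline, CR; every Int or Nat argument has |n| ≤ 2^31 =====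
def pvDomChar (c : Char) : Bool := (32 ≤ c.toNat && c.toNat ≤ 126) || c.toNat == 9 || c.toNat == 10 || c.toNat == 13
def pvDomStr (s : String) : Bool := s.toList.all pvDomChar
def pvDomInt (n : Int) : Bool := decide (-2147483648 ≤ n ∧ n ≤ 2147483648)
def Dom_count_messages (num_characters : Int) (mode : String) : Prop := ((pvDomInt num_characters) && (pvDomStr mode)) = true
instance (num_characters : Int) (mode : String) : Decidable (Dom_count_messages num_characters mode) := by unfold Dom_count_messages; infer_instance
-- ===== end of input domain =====

-- B replaces A's scan over the SMS_SIZES table by closed-form ceiling-division arithmetic (idiomatic; same cost).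


-- ===== PORT A =====
def SMS_SIZES : List (Int × Int) := [(160, 70), (306, 134), (459, 201), (612, 268), (765, 335)]

-- the 'for idx, (gsm7, utf16) in enumerate(SMS_SIZES)' loop with its early returns
def countLoopA (num_characters : Int) (mode : String) : List (Int × (Int × Int)) → Option Int
  | [] => none
  | (idx, (gsm7, utf16)) :: rest =>
    if mode == "gsm7" then
      if gsm7 ≥ num_characters then some (idx + 1)
      else countLoopA num_characters mode rest
    else
      if utf16 ≥ num_characters then some (idx + 1)
      else countLoopA num_characters mode rest

def count_messages (num_characters : Int) (mode : String) : Option Int :=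
  countLoopA num_characters mode (PySem.List.enumerate SMS_SIZES)

-- ===== PORT B =====
def count_messages_alt (num_characters : Int) (mode : String) : Option Int :=
  let se := if mode == "gsm7" then ((160 : Int), (153 : Int)) else ((70 : Int), (67 : Int))
  if num_characters ≤ se.1 then some 1
  else
    let n := -(PySem.Int.floordiv (-num_characters) se.2)  -- ceiling division
    if n ≤ 5 then some n else none

-- ===== PRECONDITION & SPEC =====
def Spec_count_messages (num_characters : Int) (mode : String) (out : Option Int) : Prop := out = count_messages_alt num_characters mode
instance (num_characters : Int) (mode : String) (out : Option Int) : Decidable (Spec_count_messages num_characters mode out) := by unfold Spec_count_messages; infer_instance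

-- ===== CLAIM (what is proved, stated in full; the proofs are below) =====
def Claim_equal_count_messages : Prop := ∀ (num_characters : Int) (mode : String), Dom_count_messages num_characters mode → Spec_count_messages num_characters mode (count_messages num_characters mode)

-- ===== LEMMAS AND PROOFS =====

theorem count_messages_eq (num_characters : Int) (mode : String) :
    count_messages num_characters mode = count_messages_alt num_characters mode := by
  have hq := PySem.Int.floordiv_mul_add_mod (-num_characters)
  by_cases h : mode == "gsm7" <;>
  · have h1 := hq 153
    have h2 := PySem.Int.mod_nonneg (-num_characters) (b := 153) (by norm_num)
    have h3 := PySem.Int.mod_lt (-num_characters) (b := 153) (by norm_num)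
    have h1' := hq 67
    have h2' := PySem.Int.mod_nonneg (-num_characters) (b := 67) (by norm_num)
    have h3' := PySem.Int.mod_lt (-num_characters) (b := 67) (by norm_num)
    simp only [count_messages, count_messages_alt, countLoopA, SMS_SIZES,
      PySem.List.enumerate_cons, PySem.List.enumerate_nil, h, if_true, if_false,
      Bool.false_eq_true]
    set q := PySem.Int.floordiv (-num_characters) 153 with hqdef
    set r := PySem.Int.floordiv (-num_characters) 67 with hrdef
    norm_num only
    split_ifs <;> first | rfl | omega | (simp only [Option.some.injEq]; omega)

-- ===== VERDICT (by name: the statement is the Claim_ definition above) =====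
theorem count_messages_spec : Claim_equal_count_messages := by
  intro n mode _
  unfold Spec_count_messages
  exact count_messages_eq n mode
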